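-- pv_equiv track=rewrite | github.com/Dev-Rodogarcia/rpa-conversao-txt-siproquim | src/extrator/campo_extractor.py | _subsequencias
-- ===== SOURCE A (Python) =====
-- import itertools
--
-- def _subsequencias(valor: str, tamanho: int, limite: int) -> list[str]:
--     """Gera subsequencias em ordem, com limite para evitar explosao combinatoria."""
--     if len(valor) < tamanho:
--         return []
--     if len(valor) == tamanho:
--         return [valor]
--
--     resultado = []
--     for idxs in itertools.combinations(range(len(valor)), tamanho):
--         resultado.append(''.join(valor[i] for i in idxs))
--         if len(resultado) >= limite:
--             break
--     return resultado
-- ===== SOURCE B (Python) =====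
-- def _subsequencias(valor: str, tamanho: int, limite: int) -> list[str]:
--     """Recursive backtracking over start indices, stopping as soon as limite results exist."""
--     n = len(valor)
--     if n < tamanho:
--         return []
--     if n == tamanho:
--         return [valor]
--     out = []
--
--     def rec(start, k, prefix):
--         if k == 0:
--             out.append(''.join(prefix))
--             return len(out) >= limite
--         for i in range(start, n):
--             if rec(i + 1, k - 1, prefix + [valor[i]]):
--                 return True
--         return False
--
--     rec(0, tamanho, [])
--     return out
-- ===== Notes on version B (the rewrite author's own statement) =====
-- stated objective: alternative
-- what changed: Replaces itertools.combinations over index tuples plus a per-tuple join with a recursive backtracking search that extends a character prefix in lexicographic index order and returns early once limite results are collected.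
import Mathlib
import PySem

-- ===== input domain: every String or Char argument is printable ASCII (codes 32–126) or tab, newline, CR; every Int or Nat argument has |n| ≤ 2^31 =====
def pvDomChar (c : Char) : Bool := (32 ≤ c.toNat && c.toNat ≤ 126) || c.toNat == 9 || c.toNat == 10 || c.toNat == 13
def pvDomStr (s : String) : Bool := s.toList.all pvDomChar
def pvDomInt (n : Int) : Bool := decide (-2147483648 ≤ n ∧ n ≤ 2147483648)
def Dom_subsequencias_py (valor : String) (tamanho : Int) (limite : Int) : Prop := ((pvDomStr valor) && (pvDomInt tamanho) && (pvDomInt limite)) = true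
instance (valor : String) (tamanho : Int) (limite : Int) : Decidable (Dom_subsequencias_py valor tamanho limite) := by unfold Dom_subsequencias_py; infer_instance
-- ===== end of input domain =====

-- B replaces itertools.combinations + per-tuple join by a recursive backtracking search that
-- extends a character prefix and stops as soon as `limite` results exist (objective: alternative).

-- ===== PORT A =====
-- itertools.combinations(range(n), k): increasing index tuples in lexicographic order
-- (ported by hand; exact for the lexicographic order itertools documents).
def pyCombs (k : Nat) (xs : List Nat) : List (List Nat) :=
  match k, xs with
  | 0, _ => [[]]
  | _ + 1, [] => []
  | k + 1, x :: rest => ((pyCombs k rest).map (fun c => x :: c)) ++ pyCombs (k + 1) rest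

-- the for-loop of A with its append and conditional break
def aLoop (limite : Int) (valor : List Char) : List (List Nat) → List String → List String
  | [], res => res
  | c :: rest, res =>
      let res' := res ++ [String.ofList (c.map (fun i => valor.getD i ' '))]
      if limite ≤ (res'.length : Int) then res' else aLoop limite valor rest res'

def subsequencias_py (valor : String) (tamanho : Int) (limite : Int) : List String :=
  if PySem.Str.len valor < tamanho then []
  else if PySem.Str.len valor = tamanho then [valor]
  else aLoop limite valor.toList (pyCombs tamanho.toNat (List.range valor.toList.length)) []

-- ===== PORT B =====
-- rec(start, k, prefix): emit ''.join(prefix) when k == 0 (returning whether the limit is now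
-- reached), else run the for-loop over i in range(start, n) (bGo); the Nat `fuel` argument only
-- makes the structural recursion evident (2*n+2 suffices, proved by the lemmas below).
mutual
def bRec (valor : List Char) (limite : Int) (n : Nat) : Nat → Nat → Int → List Char → List String → List String × Bool
  | 0, _, _, _, out => (out, false)
  | f + 1, start, k, pre, out =>
      if k = 0 then
        let out' := out ++ [String.ofList pre]
        (out', decide (limite ≤ (out'.length : Int)))
      else bGo valor limite n f start k pre out
def bGo (valor : List Char) (limite : Int) (n : Nat) : Nat → Nat → Int → List Char → List String → List String × Bool
  | 0, _, _, _, out => (out, false)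
  | f + 1, i, k, pre, out =>
      if i < n then
        let r := bRec valor limite n f (i + 1) (k - 1) (pre ++ [valor.getD i ' ']) out
        if r.2 then r else bGo valor limite n f (i + 1) k pre r.1
      else (out, false)
end

def subsequencias_py_alt (valor : String) (tamanho : Int) (limite : Int) : List String :=
  let n := valor.toList.length
  if (n : Int) < tamanho then []
  else if (n : Int) = tamanho then [valor]
  else (bRec valor.toList limite n (2 * n + 2) 0 tamanho [] []).1

-- ===== PRECONDITION & SPEC =====
-- Pre_ excludes exactly tamanho < 0, where itertools.combinations raises ValueError.
def Pre_subsequencias_py (valor : String) (tamanho : Int) (limite : Int) : Prop := 0 ≤ tamanho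
instance (valor : String) (tamanho : Int) (limite : Int) : Decidable (Pre_subsequencias_py valor tamanho limite) := by unfold Pre_subsequencias_py; infer_instance

def pvWitness_subsequencias_py : String × Int × Int := ("abcd", 2, 3)

def Spec_subsequencias_py (valor : String) (tamanho : Int) (limite : Int) (out : List String) : Prop := out = subsequencias_py_alt valor tamanho limite
instance (valor : String) (tamanho : Int) (limite : Int) (out : List String) : Decidable (Spec_subsequencias_py valor tamanho limite out) := by unfold Spec_subsequencias_py; infer_instance

-- ===== CLAIM (what is proved, stated in full; the proofs are below) =====
def Claim_equal_subsequencias_py : Prop := ∀ (valor : String) (tamanho : Int) (limite : Int), Dom_subsequencias_py valor tamanho limite → Pre_subsequencias_py valor tamanho limite → Spec_subsequencias_py valor tamanho limite (subsequencias_py valor tamanho limite)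


-- ===== LEMMAS AND PROOFS =====

-- common reference loop: append each string, stop (flag true) once the limit is reached
def emit (limite : Int) : List String → List String → List String × Bool
  | [], out => (out, false)
  | s :: rest, out =>
      let out' := out ++ [s]
      if limite ≤ (out'.length : Int) then (out', true) else emit limite rest out'

-- the strings, in order, that index-combinations of [i, i+n') produce on top of prefix `pre`
def strsOf (valor : List Char) (pre : List Char) (k : Nat) (i n' : Nat) : List String :=
  (pyCombs k (List.range' i n')).map (fun c => String.ofList (pre ++ c.map (fun j => valor.getD j ' ')))

theorem aLoop_eq_emit (limite : Int) (valor : List Char) (cs : List (List Nat)) (res : List String) :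
    aLoop limite valor cs res
      = (emit limite (cs.map (fun c => String.ofList (c.map (fun i => valor.getD i ' ')))) res).1 := by
  induction cs generalizing res with
  | nil => simp [aLoop, emit]
  | cons c rest ih =>
      simp only [aLoop, emit, List.map_cons]
      split_ifs <;> simp [ih]

theorem emit_append (limite : Int) (l₁ l₂ : List String) (out : List String) :
    emit limite (l₁ ++ l₂) out
      = (if (emit limite l₁ out).2 then emit limite l₁ out else emit limite l₂ (emit limite l₁ out).1) := by
  induction l₁ generalizing out with
  | nil => simp [emit]
  | cons s rest ih =>
      simp only [List.cons_append, emit]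
      by_cases h : limite ≤ ((out ++ [s]).length : Int)
      · simp only [if_pos h]; simp
      · simp only [if_neg h]; exact ih _

theorem strsOf_split (valor pre : List Char) (k : Nat) (i m n : Nat) (hin : i < n) (hm : n - i = m + 1) :
    strsOf valor pre (k + 1) i (m + 1)
      = strsOf valor (pre ++ [valor.getD i ' ']) k (i + 1) (n - (i + 1))
        ++ strsOf valor pre (k + 1) (i + 1) (n - (i + 1)) := by
  have hm' : n - (i + 1) = m := by omega
  simp [strsOf, List.range'_succ, pyCombs, hm', List.map_append, List.map_map, Function.comp]

theorem bRec_bGo_eq_emit (valor : List Char) (limite : Int) (n : Nat) (k : Nat) :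
    (∀ f i pre out, 2 * (n - i) + 2 ≤ f →
        bRec valor limite n f i (k : Int) pre out = emit limite (strsOf valor pre k i (n - i)) out)
    ∧ (∀ f i pre out, 2 * (n - i) + 1 ≤ f →
        bGo valor limite n f i ((k : Int) + 1) pre out
          = emit limite (strsOf valor pre (k + 1) i (n - i)) out) := by
  induction k with
  | zero =>
      have hG : ∀ m f i, n - i = m → 2 * (n - i) + 1 ≤ f → ∀ pre out,
          bGo valor limite n f i ((0 : Nat) + 1 : Int) pre out
            = emit limite (strsOf valor pre 1 i (n - i)) out := by
        intro m
        induction m with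
        | zero =>
            intro f i hm hf pre out
            obtain ⟨f', rfl⟩ : ∃ f', f = f' + 1 := ⟨f - 1, by omega⟩
            rw [hm]
            simp [bGo, strsOf, pyCombs, emit, show ¬ i < n by omega]
        | succ m ihm =>
            intro f i hm hf pre out
            obtain ⟨f', rfl⟩ : ∃ f', f = f' + 1 := ⟨f - 1, by omega⟩
            have hin : i < n := by omega
            rw [bGo]
            simp only [hin, if_true]
            have h1 : ((0 : Nat) + 1 : Int) - 1 = ((0 : Nat) : Int) := by norm_num
            have hrec : bRec valor limite n f' (i + 1) (((0 : Nat) + 1 : Int) - 1) (pre ++ [valor.getD i ' ']) out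
                = emit limite (strsOf valor (pre ++ [valor.getD i ' ']) 0 (i + 1) (n - (i + 1))) out := by
              rw [h1]
              obtain ⟨f'', rfl⟩ : ∃ f'', f' = f'' + 1 := ⟨f' - 1, by omega⟩
              by_cases h : limite ≤ ((out.length : Int) + 1) <;>
                simp [bRec, strsOf, pyCombs, emit, h]
            rw [hrec, hm, strsOf_split valor pre 0 i m n hin hm, emit_append]
            split_ifs with hs
            · rfl
            · exact ihm f' (i + 1) (by omega) (by omega) pre _
      constructor
      · intro f i pre out hf
        obtain ⟨f', rfl⟩ : ∃ f', f = f' + 1 := ⟨f - 1, by omega⟩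
        by_cases h : limite ≤ ((out.length : Int) + 1) <;>
          simp [bRec, strsOf, pyCombs, emit, h]
      · intro f i pre out hf
        exact hG (n - i) f i rfl hf pre out
  | succ k ihk =>
      have hR : ∀ f i pre out, 2 * (n - i) + 2 ≤ f →
          bRec valor limite n f i ((k + 1 : Nat) : Int) pre out
            = emit limite (strsOf valor pre (k + 1) i (n - i)) out := by
        intro f i pre out hf
        obtain ⟨f', rfl⟩ : ∃ f', f = f' + 1 := ⟨f - 1, by omega⟩
        rw [bRec]
        have hne : ¬ (((k + 1 : Nat) : Int) = 0) := by push_cast; omega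
        simp only [hne, if_false]
        have hc : ((k + 1 : Nat) : Int) = (k : Int) + 1 := by push_cast; ring
        rw [hc, ihk.2 f' i pre out (by omega)]
      have hG : ∀ m f i, n - i = m → 2 * (n - i) + 1 ≤ f → ∀ pre out,
          bGo valor limite n f i (((k + 1 : Nat) : Int) + 1) pre out
            = emit limite (strsOf valor pre (k + 2) i (n - i)) out := by
        intro m
        induction m with
        | zero =>
            intro f i hm hf pre out
            obtain ⟨f', rfl⟩ : ∃ f', f = f' + 1 := ⟨f - 1, by omega⟩
            rw [hm]
            simp [bGo, strsOf, pyCombs, emit, show ¬ i < n by omega]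
        | succ m ihm =>
            intro f i hm hf pre out
            obtain ⟨f', rfl⟩ : ∃ f', f = f' + 1 := ⟨f - 1, by omega⟩
            have hin : i < n := by omega
            rw [bGo]
            simp only [hin, if_true]
            have h1 : (((k + 1 : Nat) : Int) + 1 - 1) = ((k + 1 : Nat) : Int) := by ring
            rw [h1, hR f' (i + 1) (pre ++ [valor.getD i ' ']) out (by omega), hm,
              strsOf_split valor pre (k + 1) i m n hin hm, emit_append]
            split_ifs with hs
            · rfl
            · exact ihm f' (i + 1) (by omega) (by omega) pre _
      exact ⟨hR, fun f i pre out hf => hG (n - i) f i rfl hf pre out⟩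

-- ===== VERDICT (by name: the statement is the Claim_ definition above) =====
theorem subsequencias_py_spec : Claim_equal_subsequencias_py := by
  intro valor tamanho limite _hdom hpre
  unfold Spec_subsequencias_py subsequencias_py subsequencias_py_alt
  simp only [PySem.Str.len_eq]
  split_ifs with h1 h2
  · rfl
  · rfl
  · set n := valor.toList.length with hn
    have hk : ((tamanho.toNat : Nat) : Int) = tamanho := Int.toNat_of_nonneg hpre
    rw [aLoop_eq_emit]
    have hb : bRec valor.toList limite n (2 * n + 2) 0 tamanho [] []
        = bRec valor.toList limite n (2 * n + 2) 0 ((tamanho.toNat : Nat) : Int) [] [] := by rw [hk]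
    rw [hb, (bRec_bGo_eq_emit valor.toList limite n tamanho.toNat).1 (2 * n + 2) 0 [] [] (by omega)]
    simp [strsOf, List.range_eq_range']
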